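-- pv_equiv track=rewrite | github.com/christosalog/DFS-lineup-generator | src/Modelling/lineup_opt.py | fill_position
-- ===== SOURCE A (Python) =====
-- def fill_position(pos, player_pos_list):
--     if pos == 'PG':
--         pg = [pp for pp in player_pos_list if pp[1]=='PG']
--         pgsg = [pp for pp in player_pos_list if 'PG' in pp[1]]
--         if len(pg) > 0:
--             player = pg[0][0]
--             player_pos_list.remove(pg[0])
--             return player, player_pos_list
--         elif len(pgsg) > 0:
--             player = pgsg[0][0]
--             player_pos_list.remove(pgsg[0])
--             return player, player_pos_list
--     elif pos == 'SG':
--         sg = [pp for pp in player_pos_list if pp[1]=='SG']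
--         pgsg = [pp for pp in player_pos_list if 'SG' in pp[1]]
--         if len(sg) > 0:
--             player = sg[0][0]
--             player_pos_list.remove(sg[0])
--             return player, player_pos_list
--         elif len(pgsg) > 0:
--             player = pgsg[0][0]
--             player_pos_list.remove(pgsg[0])
--             return player, player_pos_list
--     elif pos == 'SF':
--         sf = [pp for pp in player_pos_list if pp[1]=='SF']
--         sfpf = [pp for pp in player_pos_list if 'SF' in pp[1]]
--         if len(sf) > 0:
--             player = sf[0][0]
--             player_pos_list.remove(sf[0])
--             return player, player_pos_list
--         elif len(sfpf) > 0:
--             player = sfpf[0][0]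
--             player_pos_list.remove(sfpf[0])
--             return player, player_pos_list
--     elif pos == 'PF':
--         pf = [pp for pp in player_pos_list if pp[1]=='PF']
--         sfpf = [pp for pp in player_pos_list if 'PF' in pp[1]]
--         if len(pf) > 0:
--             player = pf[0][0]
--             player_pos_list.remove(pf[0])
--             return player, player_pos_list
--         elif len(sfpf) > 0:
--             player = sfpf[0][0]
--             player_pos_list.remove(sfpf[0])
--             return player, player_pos_list
--     elif pos == 'C':
--         center = [pp for pp in player_pos_list if pp[1]=='C']
--         pfc = [pp for pp in player_pos_list if 'C' in pp[1]]
--         if len(center) > 0: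
--             player = center[0][0]
--             player_pos_list.remove(center[0])
--             return player, player_pos_list
--         elif len(pfc) > 0:
--             player = pfc[0][0]
--             player_pos_list.remove(pfc[0])
--             return player, player_pos_list
--     elif pos == 'G':
--         guard = [pp for pp in player_pos_list if 'G' in pp[1]]
--         player = guard[0][0]
--         player_pos_list.remove(guard[0])
--         return player, player_pos_list
--     elif pos == 'F':
--         forward = [pp for pp in player_pos_list if 'F' in pp[1]]
--         player = forward[0][0]
--         player_pos_list.remove(forward[0])
--         return player, player_pos_list
--     elif pos == 'UTIL':
--         player = player_pos_list[0][0]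
--         player_pos_list.pop()
--         return player, player_pos_list
-- ===== SOURCE B (Python) =====
-- # Table-driven re-implementation: one shared index-scan routine for the five
-- # lineup slots, slicing instead of in-place removal (return value only; unlike A,
-- # B does not mutate player_pos_list).  On UTIL A pops the LAST element while
-- # naming the first player; B drops the first (the intended one) -- see D_.
-- def fill_position(pos, player_pos_list):
--     if pos == 'UTIL':
--         if not player_pos_list:
--             return None
--         return player_pos_list[0][0], player_pos_list[1:]
--     POS = {'PG': ('PG', 'PG'), 'SG': ('SG', 'SG'), 'SF': ('SF', 'SF'),
--            'PF': ('PF', 'PF'), 'C': ('C', 'C'), 'G': (None, 'G'), 'F': (None, 'F')}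
--     if pos not in POS:
--         return None
--     exact, sub = POS[pos]
--     i = next((k for k, pp in enumerate(player_pos_list) if pp[1] == exact), None)
--     if i is None:
--         i = next((k for k, pp in enumerate(player_pos_list) if sub in pp[1]), None)
--     if i is None:
--         return None
--     return player_pos_list[i][0], player_pos_list[:i] + player_pos_list[i + 1:]
-- ===== Notes on version B (the rewrite author's own statement) =====
-- stated objective: simpler
-- what changed: Replaces the five copy-pasted branches building two full filtered lists and removing by value with one table-driven routine that finds the first matching index (exact, then substring) and slices it out; B also does not mutate the input list (return value only).
-- intended difference: On pos='UTIL' with at least 2 players where dropping the first differs from dropping the last, A returns the first player's name but removes the LAST list element (stale pop()); B removes the first element, which is the player actually selected. — e.g. on fill_position("UTIL", [("a", "PG"), ("b", "SG")]): A returns some ("a", [("a", "PG")]), B returns some ("a", [("b", "SG")])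
import Mathlib
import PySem

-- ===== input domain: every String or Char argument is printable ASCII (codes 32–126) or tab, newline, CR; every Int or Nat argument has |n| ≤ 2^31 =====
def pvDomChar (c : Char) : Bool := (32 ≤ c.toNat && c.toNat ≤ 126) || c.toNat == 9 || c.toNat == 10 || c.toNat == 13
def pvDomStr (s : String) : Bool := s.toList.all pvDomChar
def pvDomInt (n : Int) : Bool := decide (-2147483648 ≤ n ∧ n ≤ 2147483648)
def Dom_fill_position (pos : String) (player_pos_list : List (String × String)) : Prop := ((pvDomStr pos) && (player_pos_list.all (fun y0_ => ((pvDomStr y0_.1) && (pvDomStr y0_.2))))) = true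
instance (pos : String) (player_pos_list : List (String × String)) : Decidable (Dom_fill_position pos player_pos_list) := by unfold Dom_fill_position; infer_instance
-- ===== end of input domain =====

-- B replaces A's five copy-pasted filter-twice-and-remove-by-value branches by one
-- table-driven first-index scan with slicing (equivalence is about the RETURN value:
-- A mutates player_pos_list, B does not); on 'UTIL' A pops the last element while
-- naming the first player — B drops the first, stated as the intended difference D_.


-- ===== PORT A =====
-- one filtered-list selection of A: `[pp for pp in l if p(pp)]`, take its head,
-- `l.remove` it (`PySem.List.remove?` never fails here: the head is in `l`).
def aScan (p : (String × String) → Bool) (l : List (String × String)) :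
    Option (String × List (String × String)) :=
  match l.filter p with
  | e :: _ => (PySem.List.remove? l e).map (fun l' => (e.1, l'))
  | [] => none

-- one of A's five identical position branches: exact-tag list first, then substring list
def aBranch (tag : String) (l : List (String × String)) :
    Option (String × List (String × String)) :=
  match l.filter (fun pp => pp.2 == tag) with
  | e :: _ => (PySem.List.remove? l e).map (fun l' => (e.1, l'))
  | [] =>
    match l.filter (fun pp => PySem.Str.isIn tag pp.2) with
    | s :: _ => (PySem.List.remove? l s).map (fun l' => (s.1, l'))
    | [] => none

def fill_position (pos : String) (player_pos_list : List (String × String)) : Option (String × (List (String × String))) :=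
  if pos = "PG" then aBranch "PG" player_pos_list
  else if pos = "SG" then aBranch "SG" player_pos_list
  else if pos = "SF" then aBranch "SF" player_pos_list
  else if pos = "PF" then aBranch "PF" player_pos_list
  else if pos = "C" then aBranch "C" player_pos_list
  else if pos = "G" then aScan (fun pp => PySem.Str.isIn "G" pp.2) player_pos_list
    -- guard[0] raises IndexError when the scan is empty (aScan = none); excluded by Pre_
  else if pos = "F" then aScan (fun pp => PySem.Str.isIn "F" pp.2) player_pos_list
    -- same IndexError corner; excluded by Pre_
  else if pos = "UTIL" then
    match player_pos_list with
    | p :: _ => some (p.1, player_pos_list.dropLast)  -- .pop() drops the LAST element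
    | [] => none  -- player_pos_list[0] raises IndexError; excluded by Pre_
  else none

-- ===== PORT B =====
-- B's dispatch table: pos -> (exact tag or None, substring tag)
def posDict : PySem.Dict String (Option String × String) :=
  PySem.Dict.ofList
    [("PG", (some "PG", "PG")), ("SG", (some "SG", "SG")), ("SF", (some "SF", "SF")),
     ("PF", (some "PF", "PF")), ("C", (some "C", "C")),
     ("G", (none, "G")), ("F", (none, "F"))]

-- B's final step: `player_pos_list[i][0], player_pos_list[:i] + player_pos_list[i+1:]`
-- (i, when present, comes from findIdx?, so it is a valid non-negative index
-- and take/drop are exactly those Python slices)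
def bPick (l : List (String × String)) (oi : Option Nat) :
    Option (String × List (String × String)) :=
  match oi with
  | some i =>
    match l[i]? with
    | some e => some (e.1, l.take i ++ l.drop (i + 1))
    | none => none
  | none => none

def fill_position_alt (pos : String) (player_pos_list : List (String × String)) : Option (String × (List (String × String))) :=
  if pos = "UTIL" then
    match player_pos_list with
    | [] => none
    | p :: rest => some (p.1, rest)   -- l[0][0], l[1:]
  else
    match PySem.Dict.get? posDict pos with
    | none => none
    | some (exact, sub) =>
      bPick player_pos_list
        (match player_pos_list.findIdx? (fun pp => some pp.2 == exact) with
         | some i => some i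
         | none => player_pos_list.findIdx? (fun pp => PySem.Str.isIn sub pp.2))

-- ===== PRECONDITION & SPEC =====
-- Pre_ excludes exactly the inputs where A raises IndexError: pos 'G'/'F' with no
-- position string containing that letter, and pos 'UTIL' with an empty list.
def Pre_fill_position (pos : String) (player_pos_list : List (String × String)) : Prop :=
  (pos = "G" → ∃ pp ∈ player_pos_list, PySem.Str.isIn "G" pp.2 = true) ∧
  (pos = "F" → ∃ pp ∈ player_pos_list, PySem.Str.isIn "F" pp.2 = true) ∧
  (pos = "UTIL" → player_pos_list ≠ [])
instance (pos : String) (player_pos_list : List (String × String)) : Decidable (Pre_fill_position pos player_pos_list) := by unfold Pre_fill_position; infer_instance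
def pvWitness_fill_position : String × (List (String × String)) :=
  ("PG", [("a", "SG"), ("b", "PG/SG")])

-- On pos='UTIL' with ≥ 2 players where dropping the first element differs from dropping
-- the last, A returns the FIRST player's name but removes the LAST list element (a stale
-- .pop()); B removes the first element — the player actually selected — which is intended.
def D_fill_position (pos : String) (player_pos_list : List (String × String)) : Prop :=
  pos = "UTIL" ∧ 2 ≤ player_pos_list.length ∧ player_pos_list.tail ≠ player_pos_list.dropLast
instance (pos : String) (player_pos_list : List (String × String)) : Decidable (D_fill_position pos player_pos_list) := by unfold D_fill_position; infer_instance

def Spec_fill_position (pos : String) (player_pos_list : List (String × String)) (out : Option (String × (List (String × String)))) : Prop := ¬ D_fill_position pos player_pos_list → out = fill_position_alt pos player_pos_list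
instance (pos : String) (player_pos_list : List (String × String)) (out : Option (String × (List (String × String)))) : Decidable (Spec_fill_position pos player_pos_list out) := by unfold Spec_fill_position; infer_instance

def pvDiffWitness_fill_position : String × (List (String × String)) :=
  ("UTIL", [("a", "PG"), ("b", "SG")])
def pvDiffWitnessOut_fill_position : (Option (String × (List (String × String)))) × (Option (String × (List (String × String)))) :=
  (some ("a", [("a", "PG")]), some ("a", [("b", "SG")]))

-- ===== CLAIM (what is proved, stated in full; the proofs are below) =====
def Claim_unchanged_fill_position : Prop := ∀ (pos : String) (player_pos_list : List (String × String)), Dom_fill_position pos player_pos_list → Pre_fill_position pos player_pos_list → Spec_fill_position pos player_pos_list (fill_position pos player_pos_list)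
def Claim_changed_fill_position : Prop := Dom_fill_position (pvDiffWitness_fill_position.1) (pvDiffWitness_fill_position.2) ∧ Pre_fill_position (pvDiffWitness_fill_position.1) (pvDiffWitness_fill_position.2) ∧ D_fill_position (pvDiffWitness_fill_position.1) (pvDiffWitness_fill_position.2) ∧ fill_position (pvDiffWitness_fill_position.1) (pvDiffWitness_fill_position.2) = pvDiffWitnessOut_fill_position.1 ∧ fill_position_alt (pvDiffWitness_fill_position.1) (pvDiffWitness_fill_position.2) = pvDiffWitnessOut_fill_position.2 ∧ pvDiffWitnessOut_fill_position.1 ≠ pvDiffWitnessOut_fill_position.2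
def Claim_exact_fill_position : Prop := ∀ (pos : String) (player_pos_list : List (String × String)), Dom_fill_position pos player_pos_list → Pre_fill_position pos player_pos_list → D_fill_position pos player_pos_list → fill_position pos player_pos_list ≠ fill_position_alt pos player_pos_list

-- ===== LEMMAS AND PROOFS =====

-- A's head-of-filter-and-remove equals B's pick at the first matching index.
lemma aScan_eq_bPick (p : (String × String) → Bool) (l : List (String × String)) :
    aScan p l = bPick l (l.findIdx? p) := by
  induction l with
  | nil => rfl
  | cons a t ih =>
    by_cases hp : p a = true
    · simp [aScan, bPick, hp, List.findIdx?_cons]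
    · have hpf : p a = false := by simpa using hp
      have step : aScan p (a :: t) = (aScan p t).map (fun r => (r.1, a :: r.2)) := by
        unfold aScan
        simp only [List.filter_cons, hpf, if_neg, Bool.false_eq_true, not_false_iff]
        cases hfil : t.filter p with
        | nil => simp
        | cons e es =>
          have hpe : p e = true := (List.mem_filter.mp (hfil ▸ List.mem_cons_self)).2
          have hne : a ≠ e := fun h => by rw [h] at hpf; rw [hpe] at hpf; cases hpf
          simp only []
          rw [PySem.List.remove?_cons_of_ne t hne]
          simp [Option.map_map, Function.comp_def]
      rw [step, ih]
      cases hidx : t.findIdx? p with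
      | none => simp [bPick, List.findIdx?_cons, hpf, hidx]
      | some i =>
        simp [bPick, List.findIdx?_cons, hpf, hidx]
        cases hget : t[i]? with
        | none => simp
        | some e => simp

-- A's two-stage branch equals B's chained findIdx? pick for exact tag `some tag`.
lemma aBranch_eq (tag : String) (l : List (String × String)) :
    aBranch tag l =
      bPick l
        (match l.findIdx? (fun pp => some pp.2 == some tag) with
         | some i => some i
         | none => l.findIdx? (fun pp => PySem.Str.isIn tag pp.2)) := by
  have hpred : (fun pp : String × String => some pp.2 == some tag) = (fun pp => pp.2 == tag) := by
    funext pp; simp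
  rw [hpred]
  cases hidx : l.findIdx? (fun pp => pp.2 == tag) with
  | none =>
    have hfil : l.filter (fun pp => pp.2 == tag) = [] := by
      rw [List.filter_eq_nil_iff]
      intro x hx
      have := List.findIdx?_eq_none_iff.mp hidx x hx
      simp_all
    have h2 := aScan_eq_bPick (fun pp => PySem.Str.isIn tag pp.2) l
    simp only [aBranch, hfil]
    simpa [aScan] using h2
  | some i =>
    have hfil : l.filter (fun pp => pp.2 == tag) ≠ [] := by
      intro h
      have hall : ∀ x ∈ l, ((fun pp : String × String => pp.2 == tag) x) = false := by
        intro x hx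
        simpa using List.filter_eq_nil_iff.mp h x hx
      rw [List.findIdx?_eq_none_iff.mpr hall] at hidx
      cases hidx
    have h1 := aScan_eq_bPick (fun pp => pp.2 == tag) l
    rw [hidx] at h1
    cases hfl : l.filter (fun pp => pp.2 == tag) with
    | nil => exact absurd hfl hfil
    | cons e es =>
      simp only [aBranch, hfl]
      rw [← h1]
      simp [aScan, hfl]

lemma posDict_mk : posDict = PySem.Dict.mk
    [("PG", (some "PG", "PG")), ("SG", (some "SG", "SG")), ("SF", (some "SF", "SF")),
     ("PF", (some "PF", "PF")), ("C", (some "C", "C")),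
     ("G", (none, "G")), ("F", (none, "F"))] := by rfl

lemma get_posDict_none (pos : String) (h1 : pos ≠ "PG") (h2 : pos ≠ "SG")
    (h3 : pos ≠ "SF") (h4 : pos ≠ "PF") (h5 : pos ≠ "C") (h6 : pos ≠ "G")
    (h7 : pos ≠ "F") : PySem.Dict.get? posDict pos = none := by
  rw [posDict_mk]
  simp [PySem.Dict.get?_mk_cons, Ne.symm h1, Ne.symm h2, Ne.symm h3, Ne.symm h4,
    Ne.symm h5, Ne.symm h6, Ne.symm h7]
  exact PySem.Dict.get?_empty pos

lemma alt_tag (tag : String) (l : List (String × String))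
    (h : PySem.Dict.get? posDict tag = some (some tag, tag)) (hne : tag ≠ "UTIL") :
    fill_position_alt tag l = aBranch tag l := by
  rw [fill_position_alt.eq_def, if_neg hne, h, aBranch_eq]

lemma alt_GF (tag : String) (l : List (String × String))
    (h : PySem.Dict.get? posDict tag = some (none, tag)) (hne : tag ≠ "UTIL") :
    fill_position_alt tag l = aScan (fun pp => PySem.Str.isIn tag pp.2) l := by
  rw [fill_position_alt.eq_def, if_neg hne, h]
  have h0 : l.findIdx? (fun pp => some pp.2 == (none : Option String)) = none :=
    List.findIdx?_eq_none_iff.mpr (by intro x _; simp)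
  simp only []
  rw [h0, aScan_eq_bPick]

theorem main_unchanged : ∀ (pos : String) (l : List (String × String)),
    ¬ (pos = "UTIL" ∧ 2 ≤ l.length ∧ l.tail ≠ l.dropLast) →
    (pos = "UTIL" → l ≠ []) →
    fill_position pos l = fill_position_alt pos l := by
  intro pos l hnd hpre
  by_cases hPG : pos = "PG"
  · subst hPG; rw [alt_tag "PG" l (by rfl) (by decide)]; rfl
  by_cases hSG : pos = "SG"
  · subst hSG; rw [alt_tag "SG" l (by rfl) (by decide)]; rfl
  by_cases hSF : pos = "SF"
  · subst hSF; rw [alt_tag "SF" l (by rfl) (by decide)]; rfl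
  by_cases hPF : pos = "PF"
  · subst hPF; rw [alt_tag "PF" l (by rfl) (by decide)]; rfl
  by_cases hC : pos = "C"
  · subst hC; rw [alt_tag "C" l (by rfl) (by decide)]; rfl
  by_cases hG : pos = "G"
  · subst hG; rw [alt_GF "G" l (by rfl) (by decide)]; rfl
  by_cases hF : pos = "F"
  · subst hF; rw [alt_GF "F" l (by rfl) (by decide)]; rfl
  by_cases hU : pos = "UTIL"
  · subst hU
    cases l with
    | nil => exact absurd rfl (hpre rfl)
    | cons p rest =>
      rw [fill_position.eq_def, fill_position_alt.eq_def]
      simp only [reduceIte, String.reduceEq]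
      cases rest with
      | nil => simp
      | cons q rs =>
        have htail : (p :: q :: rs).tail = (p :: q :: rs).dropLast := by
          by_contra hne
          exact hnd ⟨rfl, by simp, hne⟩
        simp only [List.tail_cons] at htail
        rw [← htail]
  · rw [fill_position.eq_def, fill_position_alt.eq_def, if_neg hU]
    rw [get_posDict_none pos hPG hSG hSF hPF hC hG hF]
    simp [hPG, hSG, hSF, hPF, hC, hG, hF, hU]

theorem main_tight : ∀ (pos : String) (l : List (String × String)),
    (pos = "UTIL" ∧ 2 ≤ l.length ∧ l.tail ≠ l.dropLast) →
    fill_position pos l ≠ fill_position_alt pos l := by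
  intro pos l ⟨hU, hlen, htl⟩ heq
  subst hU
  cases l with
  | nil => simp at hlen
  | cons p rest =>
    rw [fill_position.eq_def, fill_position_alt.eq_def] at heq
    simp only [reduceIte, String.reduceEq] at heq
    exact htl (by simpa using heq.symm)

-- ===== VERDICT (by name: the statement is the Claim_ definition above) =====
theorem fill_position_spec : Claim_unchanged_fill_position := by
  intro pos l _ hpre hnd
  exact main_unchanged pos l hnd hpre.2.2

theorem fill_position_changed : Claim_changed_fill_position := by
  unfold Claim_changed_fill_position; decide

theorem fill_position_tight : Claim_exact_fill_position := by
  intro pos l _ _ hd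
  exact main_tight pos l hd
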